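-- pv_equiv track=rewrite | github.com/neutrons/mantid_total_scattering | pdf_plotter/io/nexus_load.py | sort_lists
-- ===== SOURCE A (Python) =====
-- def sort_lists(sorter=None, sortee=None):
--     if sorter is None or sortee is None:
--         return
--     sorter_result = [x for x, y in sorted(
--         zip(sorter, sortee), key=lambda pair: pair[0])]
--     sortee_result = [y for x, y in sorted(
--         zip(sorter, sortee), key=lambda pair: pair[0])]
--     return sorter_result, sortee_result
-- ===== SOURCE B (Python) =====
-- def sort_lists(sorter=None, sortee=None):
--     if sorter is None or sortee is None:
--         return
--     acc = []
--     for pair in zip(sorter, sortee):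
--         # binary-insertion sort: find the first position whose key is strictly
--         # greater than pair's key (so equal keys stay in arrival order: stable)
--         lo, hi = 0, len(acc)
--         while lo < hi:
--             mid = (lo + hi) // 2
--             if pair[0] < acc[mid][0]:
--                 hi = mid
--             else:
--                 lo = mid + 1
--         acc.insert(lo, pair)
--     return [p for p, _ in acc], [q for _, q in acc]
-- ===== Notes on version B (the rewrite author's own statement) =====
-- stated objective: alternative
-- what changed: B replaces A's two library sorts of the zipped pair list by a single incremental pass that builds the key-sorted pair list itself: a hand-written binary-insertion sort (iterative binary search for the first strictly-greater key, then list.insert, which keeps equal keys stable), followed by one unzip.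
import Mathlib
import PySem

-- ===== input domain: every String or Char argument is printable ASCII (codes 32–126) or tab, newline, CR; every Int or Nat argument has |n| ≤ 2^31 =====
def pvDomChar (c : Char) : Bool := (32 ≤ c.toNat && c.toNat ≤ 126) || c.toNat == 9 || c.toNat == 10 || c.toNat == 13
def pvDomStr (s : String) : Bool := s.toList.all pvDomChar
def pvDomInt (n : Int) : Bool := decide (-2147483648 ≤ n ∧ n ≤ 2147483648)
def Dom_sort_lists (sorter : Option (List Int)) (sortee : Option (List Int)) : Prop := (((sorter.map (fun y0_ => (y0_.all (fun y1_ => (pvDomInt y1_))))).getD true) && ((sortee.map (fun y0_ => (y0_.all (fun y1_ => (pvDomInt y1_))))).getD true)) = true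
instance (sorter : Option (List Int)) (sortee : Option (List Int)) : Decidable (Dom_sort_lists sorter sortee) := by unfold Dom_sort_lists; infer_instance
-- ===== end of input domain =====

-- B replaces A's two library sorts of the zipped pairs by a hand-written stable binary-insertion
-- sort (one incremental pass, then one unzip): an alternative algorithm with the same result.

-- ===== PORT A =====
def sort_lists (sorter : Option (List Int)) (sortee : Option (List Int)) : Option (List Int × List Int) :=
  match sorter, sortee with
  | some a, some b =>
    -- sorter_result: first comprehension, with its own sorted(zip(...)) call
    let sorter_result := (PySem.List.sorted (a.zip b) (fun pair => pair.1)).map (fun p => p.1)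
    -- sortee_result: second comprehension, a second identical sorted(zip(...)) call
    let sortee_result := (PySem.List.sorted (a.zip b) (fun pair => pair.1)).map (fun p => p.2)
    some (sorter_result, sortee_result)
  | _, _ => none

-- ===== PORT B =====
-- the 'while lo < hi' binary-search loop of Source B (acc[mid] is always in range: 0 ≤ lo ≤ mid < hi ≤ len(acc),
-- so pyGetD with a default is exact here)
def bisectPos (acc : List (Int × Int)) (k : Int) (lo hi : Int) : Int :=
  if h : lo < hi then
    let mid := PySem.Int.floordiv (lo + hi) 2
    if k < (PySem.List.pyGetD acc mid (0, 0)).1 then bisectPos acc k lo mid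
    else bisectPos acc k (mid + 1) hi
  else lo
termination_by (hi - lo).toNat
decreasing_by
  · have h1 : PySem.Int.floordiv (lo + hi) 2 < hi := by
      rw [PySem.Int.floordiv_eq_ediv_of_pos (by omega)]; omega
    omega
  · have h2 : lo ≤ PySem.Int.floordiv (lo + hi) 2 := by
      rw [PySem.Int.floordiv_eq_ediv_of_pos (by omega)]; omega
    omega

def sort_lists_alt (sorter : Option (List Int)) (sortee : Option (List Int)) : Option (List Int × List Int) :=
  match sorter with
  | none => none
  | some a =>
  match sortee with
  | none => none
  | some b =>
    let acc := (a.zip b).foldl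
      (fun acc pair => PySem.List.insert acc (bisectPos acc pair.1 0 (PySem.List.len acc)) pair) []
    some (acc.map (fun p => p.1), acc.map (fun p => p.2))

-- ===== PRECONDITION & SPEC =====
def Spec_sort_lists (sorter : Option (List Int)) (sortee : Option (List Int)) (out : Option (List Int × List Int)) : Prop := out = sort_lists_alt sorter sortee
instance (sorter : Option (List Int)) (sortee : Option (List Int)) (out : Option (List Int × List Int)) : Decidable (Spec_sort_lists sorter sortee out) := by unfold Spec_sort_lists; infer_instance

-- ===== CLAIM (what is proved, stated in full; the proofs are below) =====
def Claim_equal_sort_lists : Prop := ∀ (sorter : Option (List Int)) (sortee : Option (List Int)), Dom_sort_lists sorter sortee → Spec_sort_lists sorter sortee (sort_lists sorter sortee)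

-- ===== LEMMAS AND PROOFS =====

-- binary-search correctness for a key-sorted accumulator: the result r splits [lo,hi)
-- into keys ≤ k (below r) and keys > k (from r on)
theorem bisectPos_spec (acc : List (Int × Int)) (k : Int)
    (hsorted : acc.Pairwise (fun p q => p.1 ≤ q.1)) :
    ∀ (n : Nat) (lo hi : Int), (hi - lo).toNat = n → 0 ≤ lo → lo ≤ hi → hi ≤ acc.length →
      lo ≤ bisectPos acc k lo hi ∧ bisectPos acc k lo hi ≤ hi ∧
      (∀ (i : Nat) (h : i < acc.length), lo ≤ (i : Int) → (i : Int) < bisectPos acc k lo hi → acc[i].1 ≤ k) ∧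
      (∀ (i : Nat) (h : i < acc.length), bisectPos acc k lo hi ≤ (i : Int) → (i : Int) < hi → k < acc[i].1) := by
  have hmono : ∀ (i j : Nat) (hi' : i < acc.length) (hj : j < acc.length), i ≤ j → acc[i].1 ≤ acc[j].1 := by
    intro i j hi' hj hij
    rcases Nat.lt_or_ge i j with hlt | hge
    · exact (List.pairwise_iff_getElem.mp hsorted) i j hi' hj hlt
    · have : i = j := by omega
      subst this; exact le_refl _
  intro n
  induction n using Nat.strong_induction_on with
  | _ n ih =>
    intro lo hi hn h0 hlh hub
    rw [bisectPos]
    by_cases hcmp : lo < hi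
    · simp only [hcmp, dif_pos]
      have hmidlt : PySem.Int.floordiv (lo + hi) 2 < hi := by
        rw [PySem.Int.floordiv_eq_ediv_of_pos (by omega)]; omega
      have hmidge : lo ≤ PySem.Int.floordiv (lo + hi) 2 := by
        rw [PySem.Int.floordiv_eq_ediv_of_pos (by omega)]; omega
      set mid := PySem.Int.floordiv (lo + hi) 2 with hmid
      have hmidnn : 0 ≤ mid := by omega
      have hmidlen : mid < (acc.length : Int) := by omega
      have hget : PySem.List.pyGetD acc mid (0, 0) = acc[mid.toNat]'(by omega) :=
        PySem.List.pyGetD_eq_getElem acc (0, 0) hmidnn hmidlen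
      by_cases hk : k < (PySem.List.pyGetD acc mid (0, 0)).1
      · simp only [hk, if_pos]
        obtain ⟨r1, r2, r3, r4⟩ := ih (mid - lo).toNat (by omega) lo mid rfl h0 (by omega) (by omega)
        refine ⟨r1, by omega, r3, ?_⟩
        intro i hilen hri hihi
        rcases lt_or_ge (i : Int) mid with hless | hgemid
        · exact r4 i hilen hri hless
        · have hmk : k < (acc[mid.toNat]'(by omega)).1 := by rw [hget] at hk; exact hk
          have := hmono mid.toNat i (by omega) hilen (by omega)
          omega
      · simp only [hk, if_neg, not_false_iff]
        obtain ⟨r1, r2, r3, r4⟩ := ih (hi - (mid + 1)).toNat (by omega) (mid + 1) hi rfl (by omega) (by omega) hub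
        refine ⟨by omega, r2, ?_, r4⟩
        intro i hilen hloi hir
        rcases lt_or_ge (mid : Int) i with hgt | hle
        · exact r3 i hilen (by omega) hir
        · have hmk : (acc[mid.toNat]'(by omega)).1 ≤ k := by
            rw [hget] at hk; omega
          have := hmono i mid.toNat hilen (by omega) (by omega)
          omega
    · simp only [hcmp, dif_neg, not_false_iff]
      exact ⟨le_refl _, by omega, by intro i _ h1 h2; omega, by intro i _ h1 h2; omega⟩

-- inserting at a position that splits keys ≤ k / > k equals PySem's front-scan insertBy
theorem insertIdx_eq_insertBy (pair : Int × Int) :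
    ∀ (acc : List (Int × Int)) (r : Nat), r ≤ acc.length →
      (∀ (i : Nat) (h : i < acc.length), i < r → acc[i].1 ≤ pair.1) →
      (∀ (i : Nat) (h : i < acc.length), r ≤ i → pair.1 < acc[i].1) →
      acc.take r ++ pair :: acc.drop r
        = PySem.List.insertBy (fun a b => decide ((fun p : Int × Int => p.1) a < (fun p : Int × Int => p.1) b)) pair acc := by
  intro acc
  induction acc with
  | nil =>
    intro r hr _ _
    have : r = 0 := by simpa using hr
    subst this
    simp [PySem.List.insertBy]
  | cons q acc ih =>
    intro r hr h1 h2
    match r with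
    | 0 =>
      have hq : pair.1 < q.1 := by simpa using h2 0 (by simp) (by omega)
      simp [PySem.List.insertBy, hq]
    | Nat.succ m =>
      have hq : q.1 ≤ pair.1 := by simpa using h1 0 (by simp) (by omega)
      have hnot : ¬ pair.1 < q.1 := by omega
      simp only [List.take_succ_cons, List.drop_succ_cons, List.cons_append]
      rw [ih m (by simpa using hr)
        (fun i hi hir => by simpa using h1 (i + 1) (by simpa using hi) (by omega))
        (fun i hi hir => by simpa using h2 (i + 1) (by simpa using hi) (by omega))]
      simp [PySem.List.insertBy, hnot]

-- insertBy with the first-component key preserves key-sortedness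
theorem insertBy_pairwise (pair : Int × Int) :
    ∀ (acc : List (Int × Int)), acc.Pairwise (fun p q => p.1 ≤ q.1) →
      (PySem.List.insertBy (fun a b => decide ((fun p : Int × Int => p.1) a < (fun p : Int × Int => p.1) b)) pair acc).Pairwise
        (fun p q => p.1 ≤ q.1) := by
  intro acc
  induction acc with
  | nil => intro _; simp [PySem.List.insertBy]
  | cons q acc ih =>
    intro hs
    rw [List.pairwise_cons] at hs
    obtain ⟨hq, hacc⟩ := hs
    by_cases hcmp : pair.1 < q.1
    · simp only [PySem.List.insertBy, hcmp, decide_true, if_pos]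
      refine List.Pairwise.cons ?_ (List.Pairwise.cons hq hacc)
      intro x hx
      rcases List.mem_cons.mp hx with h | h
      · subst h; omega
      · have := hq x h; omega
    · simp only [PySem.List.insertBy, hcmp, decide_false, if_neg, Bool.false_eq_true, not_false_iff]
      refine List.Pairwise.cons ?_ (ih hacc)
      intro x hx
      rcases (PySem.List.mem_insertBy _ _ _ _).mp hx with h | h
      · subst h; omega
      · exact hq x h

-- one step of B (binary search + insert) equals one step of the insertion fold that defines sorted
theorem step_eq (acc : List (Int × Int)) (pair : Int × Int)
    (hsorted : acc.Pairwise (fun p q => p.1 ≤ q.1)) :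
    PySem.List.insert acc (bisectPos acc pair.1 0 (PySem.List.len acc)) pair
      = PySem.List.insertBy (fun a b => decide ((fun p : Int × Int => p.1) a < (fun p : Int × Int => p.1) b)) pair acc := by
  obtain ⟨r1, r2, r3, r4⟩ := bisectPos_spec acc pair.1 hsorted
    ((PySem.List.len acc) - 0).toNat 0 (PySem.List.len acc) rfl (by omega)
    (by simp [PySem.List.len_eq]) (by simp [PySem.List.len_eq])
  set r := bisectPos acc pair.1 0 (PySem.List.len acc) with hr
  have hlen : PySem.List.len acc = (acc.length : Int) := by simp [PySem.List.len_eq]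
  have hrnat : r = ((r.toNat : Nat) : Int) := by omega
  have hrle : r.toNat ≤ acc.length := by omega
  rw [hrnat, PySem.List.insert_natCast acc r.toNat pair hrle]
  exact insertIdx_eq_insertBy pair acc r.toNat hrle
    (fun i hi hir => r3 i hi (by omega) (by omega))
    (fun i hi hir => r4 i hi (by omega) (by omega))

-- the whole folds agree, carrying the sortedness invariant
theorem fold_eq : ∀ (l acc : List (Int × Int)), acc.Pairwise (fun p q => p.1 ≤ q.1) →
    l.foldl (fun acc pair => PySem.List.insert acc (bisectPos acc pair.1 0 (PySem.List.len acc)) pair) acc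
      = l.foldl (fun acc pair => PySem.List.insertBy (fun a b => decide ((fun p : Int × Int => p.1) a < (fun p : Int × Int => p.1) b)) pair acc) acc := by
  intro l
  induction l with
  | nil => intro acc _; rfl
  | cons x l ih =>
    intro acc hs
    simp only [List.foldl_cons]
    rw [step_eq acc x hs]
    exact ih _ (insertBy_pairwise x acc hs)

-- ===== VERDICT (by name: the statement is the Claim_ definition above) =====
theorem sort_lists_spec : Claim_equal_sort_lists := by
  intro sorter sortee _
  unfold Spec_sort_lists
  match sorter, sortee with
  | none, none => rfl
  | none, some _ => rfl
  | some _, none => rfl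
  | some a, some b =>
    simp only [sort_lists, sort_lists_alt]
    rw [PySem.List.sorted_eq_foldl_insertBy, ← fold_eq (a.zip b) [] (by simp)]
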